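-- pv_equiv track=rewrite | github.com/paiml/depyler | examples/hard_graph_patterns.py | in_degree_map
-- ===== SOURCE A (Python) =====
-- def all_nodes(graph: dict[int, list[int]]) -> list[int]:
--     """Extract all unique nodes from a graph adjacency list."""
--     node_set: dict[int, int] = {}
--     for node in graph:
--         node_set[node] = 1
--         neighbors: list[int] = graph[node]
--         j: int = 0
--         while j < len(neighbors):
--             node_set[neighbors[j]] = 1
--             j = j + 1
--     result: list[int] = []
--     for n in node_set:
--         result.append(n)
--     return result
--
-- def in_degree_map(graph: dict[int, list[int]]) -> dict[int, int]:
--     """Compute in-degree for each node in a directed graph."""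
--     nodes: list[int] = all_nodes(graph)
--     indeg: dict[int, int] = {}
--     ni: int = 0
--     while ni < len(nodes):
--         indeg[nodes[ni]] = 0
--         ni = ni + 1
--     for u in graph:
--         nbs: list[int] = graph[u]
--         ei: int = 0
--         while ei < len(nbs):
--             v: int = nbs[ei]
--             if v in indeg:
--                 indeg[v] = indeg[v] + 1
--             else:
--                 indeg[v] = 1
--             ei = ei + 1
--     return indeg
-- ===== SOURCE B (Python) =====
-- def in_degree_map(graph: dict[int, list[int]]) -> dict[int, int]:
--     """In-degree via sort + run-length scan: sort all edge targets, measure each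
--     run of equal values once, then look the counts up in first-seen node order."""
--     order = dict.fromkeys(n for u, nbs in graph.items() for n in (u, *nbs))
--     targets = sorted(v for nbs in graph.values() for v in nbs)
--     counts: dict[int, int] = {}
--     run_val, run_len = None, 0
--     for v in targets:
--         if run_len and v == run_val:
--             run_len += 1
--         else:
--             if run_len:
--                 counts[run_val] = run_len
--             run_val, run_len = v, 1
--     if run_len:
--         counts[run_val] = run_len
--     return {n: counts.get(n, 0) for n in order}
-- ===== Notes on version B (the rewrite author's own statement) =====
-- stated objective: alternative
-- what changed: Replaced A's hash-increment counting (collect nodes via all_nodes, zero-init dict, then bump a dict entry per edge) by sort-then-scan: flatten all edge targets, sort them, compute each node's in-degree once as the length of its run of equal values, and emit the result by looking the run lengths up in first-seen node order.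
import Mathlib
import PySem

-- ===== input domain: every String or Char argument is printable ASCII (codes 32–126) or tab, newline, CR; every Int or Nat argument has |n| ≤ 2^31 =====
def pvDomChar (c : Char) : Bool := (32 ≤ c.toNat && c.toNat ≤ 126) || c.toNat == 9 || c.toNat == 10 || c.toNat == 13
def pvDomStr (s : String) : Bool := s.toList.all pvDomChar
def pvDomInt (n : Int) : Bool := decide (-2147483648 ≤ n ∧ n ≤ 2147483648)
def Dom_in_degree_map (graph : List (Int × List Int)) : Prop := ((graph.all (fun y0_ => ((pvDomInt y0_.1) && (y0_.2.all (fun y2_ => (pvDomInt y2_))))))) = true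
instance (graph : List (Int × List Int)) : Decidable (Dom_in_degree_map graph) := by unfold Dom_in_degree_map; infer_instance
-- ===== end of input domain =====

-- B replaces A's staged dict mutation (node collection, zero-init, per-edge increments) by
-- sort-then-scan: sort the flattened edge targets, read each in-degree off as a run length,
-- and emit the counts in first-seen node order (alternative algorithm, same result).

-- ===== PORT A =====
-- all_nodes: collect every key and neighbor (first-seen order) into node_set, return its keys
def all_nodes_port (graph : List (Int × List Int)) : List Int :=
  let nodeSet : PySem.Dict Int Int :=
    (PySem.Dict.ofList graph).items.foldl
      (fun (d : PySem.Dict Int Int) p =>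
        p.2.foldl (fun d v => d.insert v 1) (d.insert p.1 1))
      PySem.Dict.empty
  nodeSet.keys

def in_degree_map (graph : List (Int × List Int)) : List (Int × Int) :=
  let nodes : List Int := all_nodes_port graph
  let indeg0 : PySem.Dict Int Int :=
    nodes.foldl (fun d n => d.insert n 0) PySem.Dict.empty
  let indeg : PySem.Dict Int Int :=
    (PySem.Dict.ofList graph).items.foldl
      (fun d p =>
        p.2.foldl
          (fun d v => if d.contains v then d.insert v (d.getD v 0 + 1) else d.insert v 1)
          d)
      indeg0
  indeg.items

-- ===== PORT B =====
-- order = dict.fromkeys(...) → PySem.List.dedup (first occurrences, in order);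
-- run_val = None, run_len = 0 → run_val is only read under run_len ≠ 0, carried as an Int (dummy 0)
def runStep (st : PySem.Dict Int Int × Int × Int) (v : Int) : PySem.Dict Int Int × Int × Int :=
  if st.2.2 ≠ 0 ∧ v = st.2.1 then (st.1, st.2.1, st.2.2 + 1)
  else ((if st.2.2 ≠ 0 then st.1.insert st.2.1 st.2.2 else st.1), v, 1)

-- the trailing 'if run_len: counts[run_val] = run_len'
def runFinish (st : PySem.Dict Int Int × Int × Int) : PySem.Dict Int Int :=
  if st.2.2 ≠ 0 then st.1.insert st.2.1 st.2.2 else st.1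

def in_degree_map_alt (graph : List (Int × List Int)) : List (Int × Int) :=
  let items := (PySem.Dict.ofList graph).items
  let order : List Int := PySem.List.dedup (items.flatMap (fun p => p.1 :: p.2))
  let targets : List Int := PySem.List.sorted (items.flatMap (fun p => p.2)) (fun x => x) false
  let counts : PySem.Dict Int Int := runFinish (targets.foldl runStep (PySem.Dict.empty, 0, 0))
  order.map (fun n => (n, counts.getD n 0))

-- ===== PRECONDITION & SPEC =====
def Spec_in_degree_map (graph : List (Int × List Int)) (out : List (Int × Int)) : Prop := out = in_degree_map_alt graph
instance (graph : List (Int × List Int)) (out : List (Int × Int)) : Decidable (Spec_in_degree_map graph out) := by unfold Spec_in_degree_map; infer_instance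

-- ===== CLAIM (what is proved, stated in full; the proofs are below) =====
def Claim_equal_in_degree_map : Prop := ∀ (graph : List (Int × List Int)), Dom_in_degree_map graph → Spec_in_degree_map graph (in_degree_map graph)

-- ===== LEMMAS AND PROOFS =====

-- keys_foldl_insert specialised to a constant value (A's node_set / zero-init loops)
theorem keys_fold_const (l : List Int) (v0 : Int) (d : PySem.Dict Int Int) :
    (l.foldl (fun d v => d.insert v v0) d).keys = PySem.Set.update d.keys l :=
  PySem.Dict.keys_foldl_insert l (fun _ _ => v0) d

-- a single insert appends the key as Set.add does
theorem keys_insert_eq_add (d : PySem.Dict Int Int) (k v : Int) :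
    (d.insert k v).keys = PySem.Set.add d.keys k := by
  have h := keys_fold_const [k] v d
  rw [PySem.Set.update_cons, PySem.Set.update_nil] at h
  exact h

-- A's guarded increment is the same dict transformation as an unguarded get(v,0)+1 insert
theorem stepA_eq_incr (d : PySem.Dict Int Int) (v : Int) :
    (if d.contains v then d.insert v (d.getD v 0 + 1) else d.insert v 1)
      = d.insert v (d.getD v 0 + 1) := by
  cases hc : d.contains v with
  | true => simp
  | false =>
      rw [if_neg (by simp), PySem.Dict.getD_of_not_contains d (0 : Int) hc]
      norm_num

-- keys of A's node_set loop: first-seen order of key::neighbors, flattened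
theorem keys_nodeSet (L : List (Int × List Int)) (d : PySem.Dict Int Int) :
    (L.foldl (fun (d : PySem.Dict Int Int) p =>
        p.2.foldl (fun d v => d.insert v 1) (d.insert p.1 1)) d).keys
      = PySem.Set.update d.keys (L.flatMap (fun p => p.1 :: p.2)) := by
  induction L generalizing d with
  | nil => rw [List.foldl_nil, List.flatMap_nil, PySem.Set.update_nil]
  | cons p L ih =>
      rw [List.foldl_cons, ih, keys_fold_const, keys_insert_eq_add, List.flatMap_cons,
          PySem.Set.update_append, PySem.Set.update_cons]

-- getD through the zero-initialisation loop stays 0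
theorem getD_zero_init (l : List Int) (d : PySem.Dict Int Int)
    (h : ∀ k, d.getD k 0 = 0) (k : Int) :
    (l.foldl (fun (d : PySem.Dict Int Int) n => d.insert n 0) d).getD k 0 = 0 := by
  induction l generalizing d with
  | nil => exact h k
  | cons n l ih =>
      refine ih _ (fun j => ?_)
      rw [PySem.Dict.getD_insert]
      split <;> simp [h]

-- keys_foldl_insert specialised to the increment step
theorem keys_fold_incr (l : List Int) (d : PySem.Dict Int Int) :
    (l.foldl (fun d v => d.insert v (d.getD v 0 + 1)) d).keys = PySem.Set.update d.keys l :=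
  PySem.Dict.keys_foldl_insert l (fun d x => d.getD x 0 + 1) d

-- keys of A's counting loop: existing keys updated with all neighbors
theorem keys_count_loop (L : List (Int × List Int)) (d : PySem.Dict Int Int) :
    (L.foldl (fun (d : PySem.Dict Int Int) p =>
        p.2.foldl (fun d v => d.insert v (d.getD v 0 + 1)) d) d).keys
      = PySem.Set.update d.keys (L.flatMap (fun p => p.2)) := by
  induction L generalizing d with
  | nil => rw [List.foldl_nil, List.flatMap_nil, PySem.Set.update_nil]
  | cons p L ih =>
      rw [List.foldl_cons, ih, keys_fold_incr, List.flatMap_cons, PySem.Set.update_append]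

-- getD through A's counting loop: adds the neighbor-occurrence count
theorem getD_count_loop (L : List (Int × List Int)) (d : PySem.Dict Int Int) (k : Int) :
    (L.foldl (fun (d : PySem.Dict Int Int) p =>
        p.2.foldl (fun d v => d.insert v (d.getD v 0 + 1)) d) d).getD k 0
      = d.getD k 0 + ((L.flatMap (fun p => p.2)).count k : Int) := by
  induction L generalizing d with
  | nil => simp
  | cons p L ih =>
      simp only [List.foldl_cons, ih, List.flatMap_cons, List.count_append]
      rw [PySem.Dict.getD_foldl_insert_add_one]
      push_cast
      ring

-- updating a set with elements it already has changes nothing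
theorem update_of_subset (s : PySem.Set Int) (xs : List Int) (h : ∀ x ∈ xs, x ∈ s) :
    PySem.Set.update s xs = s := by
  have hnil : List.filter (fun y => !PySem.Set.contains s y) (PySem.Set.ofList xs) = [] := by
    rw [List.filter_eq_nil_iff]
    intro y hy
    have hys : y ∈ s := h y ((PySem.Set.mem_ofList xs y).mp hy)
    simp [hys]
  rw [PySem.Set.update_eq_append_filter, hnil, List.append_nil]


-- run-length scan of a sorted list, below an open run (rv, rl): the finished dict maps the
-- run value to rl + its remaining count, every other list element to its count, and leaves d alone
theorem run_getD (l : List Int) (hl : l.Pairwise (· ≤ ·)) (d : PySem.Dict Int Int)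
    (rv rl : Int) (hrl : 0 < rl) (hlo : ∀ x ∈ l, rv ≤ x) (k : Int) :
    (runFinish (l.foldl runStep (d, rv, rl))).getD k 0 =
      if k = rv then rl + (l.count k : Int)
      else if k ∈ l then (l.count k : Int)
      else d.getD k 0 := by
  induction l generalizing d rv rl with
  | nil =>
      unfold runFinish
      rw [List.foldl_nil, if_pos (by omega : (rl ≠ 0)), PySem.Dict.getD_insert]
      simp only [List.count_nil, List.not_mem_nil, if_false]
      split <;> simp_all
  | cons v l ih =>
      have hv : ∀ x ∈ l, v ≤ x := fun x hx => (List.pairwise_cons.mp hl).1 x hx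
      have hl' : l.Pairwise (· ≤ ·) := (List.pairwise_cons.mp hl).2
      have hrv : rv ≤ v := hlo v (List.mem_cons_self)
      rw [List.foldl_cons]
      by_cases hvr : v = rv
      · rw [show runStep (d, rv, rl) v = (d, rv, rl + 1) by
          simp [runStep, hvr]
          exact fun h => absurd h (by omega : ¬rl = 0)]
        rw [ih hl' d rv (rl + 1) (by omega) (fun x hx => hlo x (List.mem_cons_of_mem _ hx))]
        subst hvr
        by_cases hk : k = v
        · subst hk; simp only [List.count_cons_self]; push_cast; ring
        · simp [hk, (show v ≠ k from fun h => hk h.symm), List.mem_cons]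
      · have hlt : rv < v := lt_of_le_of_ne hrv (fun h => hvr h.symm)
        have hrvl : rv ∉ l := fun h => absurd (hv rv h) (by omega)
        rw [show runStep (d, rv, rl) v = (d.insert rv rl, v, 1) by
          simp [runStep, hvr]
          exact fun h => absurd h (by omega : ¬rl = 0)]
        rw [ih hl' (d.insert rv rl) v 1 one_pos hv]
        by_cases hk : k = rv
        · subst hk
          have h1 : k ∉ v :: l := by
            intro h
            rcases List.mem_cons.mp h with h | h
            · exact (ne_of_lt hlt) h
            · exact hrvl h
          simp [ne_of_lt hlt, hrvl, List.count_eq_zero.mpr h1]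
        · rw [if_neg hk]
          by_cases hkv : k = v
          · subst hkv
            simp only [if_pos List.mem_cons_self, List.count_cons_self]
            push_cast; ring
          · simp [hk, hkv, (show v ≠ k from fun h => hkv h.symm),
              List.mem_cons, PySem.Dict.getD_insert]

-- the whole scan of a sorted list: the dict is exactly the multiset of counts
theorem counts_getD (s : List Int) (hs : s.Pairwise (· ≤ ·)) (k : Int) :
    (runFinish (s.foldl runStep (PySem.Dict.empty, 0, 0))).getD k 0 = (s.count k : Int) := by
  cases s with
  | nil => unfold runFinish; simp
  | cons v t =>
      rw [List.foldl_cons,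
          show runStep (PySem.Dict.empty, 0, 0) v = (PySem.Dict.empty, v, 1) by
            unfold runStep; rw [if_neg (by simp), if_neg (by simp)],
          run_getD t (List.pairwise_cons.mp hs).2 _ v 1 one_pos (List.pairwise_cons.mp hs).1 k]
      by_cases hk : k = v
      · subst hk; rw [if_pos rfl, List.count_cons_self]; push_cast; ring
      · by_cases hkt : k ∈ t
        · simp [hk, hkt, (show v ≠ k from fun h => hk h.symm)]
        · simp [hk, hkt, (show v ≠ k from fun h => hk h.symm),
            List.count_eq_zero.mpr hkt]

-- ===== VERDICT (by name: the statement is the Claim_ definition above) =====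
theorem in_degree_map_spec : Claim_equal_in_degree_map := by
  intro graph _
  unfold Spec_in_degree_map in_degree_map in_degree_map_alt all_nodes_port
  set L := (PySem.Dict.ofList graph).items with hL
  simp only
  have hstep :
      (fun (d : PySem.Dict Int Int) (v : Int) =>
          if d.contains v then d.insert v (d.getD v 0 + 1) else d.insert v 1)
        = (fun (d : PySem.Dict Int Int) (v : Int) => d.insert v (d.getD v 0 + 1)) :=
    funext fun d => funext fun v => stepA_eq_incr d v
  simp only [hstep]
  set flat := L.flatMap (fun p => p.1 :: p.2) with hflat
  set targets := L.flatMap (fun p => p.2) with htargets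
  have hnodes :
      (L.foldl (fun (d : PySem.Dict Int Int) p =>
          p.2.foldl (fun d v => d.insert v 1) (d.insert p.1 1)) PySem.Dict.empty).keys
        = PySem.Set.ofList flat := by
    rw [keys_nodeSet, PySem.Dict.keys_empty, PySem.Set.update_nil_left, hflat]
  rw [hnodes]
  set nodes := PySem.Set.ofList flat with hn
  set indeg0 := nodes.foldl (fun (d : PySem.Dict Int Int) n => d.insert n 0) PySem.Dict.empty with hi0
  set dA := L.foldl (fun (d : PySem.Dict Int Int) p =>
      p.2.foldl (fun d v => d.insert v (d.getD v 0 + 1)) d) indeg0 with hdA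
  have hsub : ∀ x ∈ targets, x ∈ nodes := by
    intro x hx
    rw [hn, PySem.Set.mem_ofList, hflat]
    rw [htargets] at hx
    simp only [List.mem_flatMap] at hx ⊢
    obtain ⟨p, hp, hxp⟩ := hx
    exact ⟨p, hp, List.mem_cons_of_mem _ hxp⟩
  have hk0 : indeg0.keys = nodes := by
    rw [hi0, keys_fold_const, PySem.Dict.keys_empty, PySem.Set.update_nil_left, hn,
        PySem.Set.ofList_ofList]
  have hkA : dA.keys = nodes := by
    rw [hdA, keys_count_loop, hk0, ← htargets, update_of_subset _ _ hsub]
  have hndA : dA.keys.Nodup := by rw [hkA, hn]; exact PySem.Set.nodup_ofList flat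
  have hget : ∀ k, dA.getD k 0 = (targets.count k : Int) := by
    intro k
    rw [hdA, getD_count_loop, ← htargets]
    have h0 : indeg0.getD k 0 = 0 := by
      rw [hi0]
      exact getD_zero_init nodes PySem.Dict.empty (fun j => by simp) k
    rw [h0, zero_add]
  have hsortcnt : ∀ k,
      (runFinish ((PySem.List.sorted targets (fun x => x) false).foldl runStep
        (PySem.Dict.empty, 0, 0))).getD k 0 = (targets.count k : Int) := by
    intro k
    rw [counts_getD _ (by simpa using PySem.List.sorted_pairwise targets (fun x => x)) k,
        (PySem.List.sorted_perm targets (fun x => x) false).count_eq]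
  rw [PySem.Dict.items_eq_map_keys dA hndA 0, hkA, PySem.List.dedup_eq_ofList, ← hn]
  exact List.map_congr_left fun k _ => by rw [hget k, hsortcnt k]
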